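-- pv_equiv track=rewrite | github.com/PhilippIcking/AdventOfCode2023 | 14.py | east
-- ===== SOURCE A (Python) =====
-- def east(dish):
--     # East
--     rock_count = 0
--     cou1 = 0
--     for y in range(len(dish)):
--         for x in range(len(dish[0])):
--             if dish[y][x] == "#" and rock_count > 0:
--                 dish[y][x-1] = rock_count
--                 cou1 += (len(dish)-y) * rock_count
--                 for z in range(rock_count):
--                     dish[y][x - 1 - z] = "O"
--                 rock_count = 0
--             elif dish[y][x] == "O":
--                 rock_count += 1
--                 dish[y][x] = "."
--             if x == (len(dish[0])-1) and rock_count > 0: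
--                 dish[y][x] = rock_count
--                 cou1 += (len(dish)-y) * rock_count
--                 for z in range(rock_count):
--                     dish[y][x - z] = "O"
--                 rock_count = 0
--     return dish, cou1
-- ===== SOURCE B (Python) =====
-- def east(dish):
--     # Rolls rocks east segment-by-segment instead of A's stateful column scan.
--     # Note: like A, mutates the row lists of `dish` in place (row[:w] = ...).
--     cou1 = 0
--     n = len(dish)
--     if n == 0:
--         return dish, 0
--     w = len(dish[0])
--     for y in range(n):
--         row = dish[y]
--         rebuilt = []
--         seg = []
--         total = 0
--         for c in row[:w]:
--             if c == "#":
--                 s, k = flush(seg)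
--                 rebuilt += s + ["#"]
--                 total += k
--                 seg = []
--             else:
--                 seg.append(c)
--         s, k = flush(seg)
--         rebuilt += s
--         total += k
--         row[:w] = rebuilt
--         cou1 += (n - y) * total
--     return dish, cou1
--
--
-- def flush(seg):
--     # push every 'O' of the segment to its right end
--     k = seg.count("O")
--     dotted = ["." if c == "O" else c for c in seg]
--     return dotted[:len(dotted) - k] + ["O"] * k, k
-- ===== Notes on version B (the rewrite author's own statement) =====
-- stated objective: alternative
-- what changed: B partitions each row into '#'-separated segments and rebuilds each segment as its non-O cells followed by its O-count rocks, instead of A's stateful column scan that writes rocks backwards into the row on each flush.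
import Mathlib
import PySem

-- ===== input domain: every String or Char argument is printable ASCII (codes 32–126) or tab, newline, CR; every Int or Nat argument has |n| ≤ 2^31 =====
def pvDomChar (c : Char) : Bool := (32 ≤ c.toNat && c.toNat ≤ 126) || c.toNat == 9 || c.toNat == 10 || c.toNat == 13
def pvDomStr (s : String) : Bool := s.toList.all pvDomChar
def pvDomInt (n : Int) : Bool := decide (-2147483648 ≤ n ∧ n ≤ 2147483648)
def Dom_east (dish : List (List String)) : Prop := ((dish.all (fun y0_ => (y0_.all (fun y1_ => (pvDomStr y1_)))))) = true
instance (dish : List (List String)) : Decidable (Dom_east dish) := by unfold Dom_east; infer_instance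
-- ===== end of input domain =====

-- B rolls the rocks of each row segment-by-segment instead of A's stateful column scan;
-- like A, the Python B mutates the row lists in place — the equivalence proved here is about the return value.

-- ===== PORT A =====
/-- `for z in range(rock_count): dish[y][x0-z] = "O"`.  The assignment
`dish[y][x0] = rock_count` that precedes this loop in A is overwritten by the
loop's very first write (z = 0), so the pair is ported as this loop alone (exact).
All these writes land at indices `0 ≤ x0 - z < len(row)` whenever the loop is
reached, so `pySetD` is exact here. -/
def eastWriteOs (row : List String) (x0 : Int) (rc : Nat) : List String :=
  (PySem.List.pyRange 0 rc 1).foldl (fun r z => PySem.List.pySetD r (x0 - z) "O") row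

/-- one iteration of A's inner `for x in range(len(dish[0]))` loop; state =
(row `dish[y]`, rock_count, cou1), `m = len(dish) - y`.  Reads `dish[y][x]` use
`pyGetD`: Pre_east puts every read in range (out of it Python raises IndexError).
`w` is `len(dish[0])`, invariant during the loop since every write replaces an
element in place. -/
def eastRowStep (m : Int) (w : Nat) (st : List String × Nat × Int) (x : Int) :
    List String × Nat × Int :=
  let st1 :=
    if PySem.List.pyGetD st.1 x "" = "#" ∧ 0 < st.2.1 then
      (eastWriteOs st.1 (x - 1) st.2.1, 0, st.2.2 + m * (st.2.1 : Int))
    else if PySem.List.pyGetD st.1 x "" = "O" then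
      (PySem.List.pySetD st.1 x ".", st.2.1 + 1, st.2.2)
    else st
  if x = (w : Int) - 1 ∧ 0 < st1.2.1 then
    (eastWriteOs st1.1 x st1.2.1, 0, st1.2.2 + m * (st1.2.1 : Int))
  else st1

/-- A's inner loop over the columns of one row. -/
def eastRowA (m : Int) (w : Nat) (st : List String × Nat × Int) : List String × Nat × Int :=
  (PySem.List.pyRange 0 (w : Int) 1).foldl (eastRowStep m w) st

/-- one iteration of A's outer `for y in range(len(dish))` loop; state =
(dish, rock_count, cou1).  Within iteration `y` only row `y` is read and
written, so the row is fetched once and stored back. -/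
def eastOuterStepA (n : Int) (st : List (List String) × Nat × Int) (y : Int) :
    List (List String) × Nat × Int :=
  let w := (PySem.List.pyGetD st.1 0 []).length   -- len(dish[0])
  let r := eastRowA (n - y) w (PySem.List.pyGetD st.1 y [], st.2.1, st.2.2)
  (PySem.List.pySetD st.1 y r.1, r.2.1, r.2.2)

/-- Port of A. -/
def east (dish : List (List String)) : List (List String) × Int :=
  let n := dish.length
  let res := (PySem.List.pyRange 0 (n : Int) 1).foldl (eastOuterStepA (n : Int)) (dish, 0, 0)
  (res.1, res.2.2)

-- ===== PORT B =====
/-- Source B's `flush(seg)`: push every 'O' of a segment to its right end. -/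
def eastFlush (seg : List String) : List String × Nat :=
  let k := PySem.List.count seg "O"
  let dotted := seg.map (fun c => if c = "O" then "." else c)
  (dotted.take (dotted.length - k) ++ List.replicate k "O", k)

/-- one step of Source B's segment scan of a row; state = (rebuilt, seg, total). -/
def eastSegStep (st : List String × List String × Nat) (c : String) :
    List String × List String × Nat :=
  if c = "#" then
    (st.1 ++ (eastFlush st.2.1).1 ++ ["#"], [], st.2.2 + (eastFlush st.2.1).2)
  else (st.1, st.2.1 ++ [c], st.2.2)

/-- Source B's per-row segment rebuild of `row[:w]`. -/
def eastRowB (p : List String) : List String × Nat :=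
  let st := p.foldl eastSegStep ([], [], 0)
  (st.1 ++ (eastFlush st.2.1).1, st.2.2 + (eastFlush st.2.1).2)

/-- one iteration of Source B's row loop; state = (rows so far, y, cou1). -/
def eastOuterStepB (n : Int) (w : Nat) (st : List (List String) × Int × Int)
    (row : List String) : List (List String) × Int × Int :=
  let rt := eastRowB (PySem.List.slice row none (some (w : Int)))       -- row[:w]
  (st.1 ++ [rt.1 ++ PySem.List.slice row (some (w : Int)) none],        -- row[:w] = rebuilt
   st.2.1 + 1, st.2.2 + (n - st.2.1) * ((rt.2 : Int)))

/-- Port of B (Source B): roll east by rebuilding each row's '#'-separated segments. -/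
def east_alt (dish : List (List String)) : List (List String) × Int :=
  let n := dish.length
  if n = 0 then (dish, 0) else
  let w := (dish.headD []).length
  let st := dish.foldl (eastOuterStepB (n : Int) w) ([], 0, 0)
  (st.1, st.2.2)

-- ===== PRECONDITION & SPEC =====
/-- A raises IndexError iff some row is shorter than `len(dish[0])`; Pre_east
excludes exactly those ragged inputs (on them A returns nothing). -/
def Pre_east (dish : List (List String)) : Prop :=
  ∀ r ∈ dish, (dish.headD []).length ≤ r.length
instance (dish : List (List String)) : Decidable (Pre_east dish) := by
  unfold Pre_east; infer_instance

def pvWitness_east : List (List String) := [["O", ".", "#"], [".", "O", "O"]]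

def Spec_east (dish : List (List String)) (out : List (List String) × Int) : Prop :=
  out = east_alt dish
instance (dish : List (List String)) (out : List (List String) × Int) :
    Decidable (Spec_east dish out) := by unfold Spec_east; infer_instance

-- ===== CLAIM (what is proved, stated in full; the proofs are below) =====
def Claim_equal_east : Prop :=
  ∀ (dish : List (List String)), Dom_east dish → Pre_east dish → Spec_east dish (east dish)

-- ===== LEMMAS AND PROOFS =====

/-- normal form of a flushed prefix: last `k` cells replaced by "O". -/
def flushcat (L : List String) (k : Nat) : List String :=
  L.take (L.length - k) ++ List.replicate k "O"

theorem flushcat_append (X Y : List String) (k : Nat) (h : k ≤ Y.length) :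
    flushcat (X ++ Y) k = X ++ flushcat Y k := by
  unfold flushcat
  rw [List.length_append, show X.length + Y.length - k = X.length + (Y.length - k) by omega,
    List.take_append]
  simp [List.take_of_length_le (by omega : X.length ≤ X.length + (Y.length - k))]

theorem eastWriteOs_succ (row : List String) (x0 : Int) (k : Nat) :
    eastWriteOs row x0 (k + 1)
      = PySem.List.pySetD (eastWriteOs row x0 k) (x0 - (k : Int)) "O" := by
  unfold eastWriteOs
  rw [show ((k + 1 : Nat) : Int) = (k : Int) + 1 by push_cast; ring,
    PySem.List.pyRange_one_succ_right (by positivity), List.foldl_append]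
  rfl

theorem eastWriteOs_spec (k : Nat) (P suf : List String) (h : k ≤ P.length) :
    eastWriteOs (P ++ suf) ((P.length : Int) - 1) k = flushcat P k ++ suf := by
  induction k with
  | zero => simp [eastWriteOs, PySem.List.pyRange_one_eq_nil, flushcat]
  | succ k ih =>
    rw [eastWriteOs_succ, ih (by omega)]
    have hj : (P.length : Int) - 1 - (k : Int) = ((P.length - 1 - k : Nat) : Int) := by omega
    rw [hj, PySem.List.pySetD_natCast]
    set j := P.length - 1 - k with hjdef
    have hjlt : j < P.length := by omega
    have hsplit : P.take (P.length - k) = P.take j ++ [P[j]] := by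
      rw [show P.length - k = j + 1 by omega, List.take_add_one,
        List.getElem?_eq_getElem hjlt]
      rfl
    unfold flushcat
    rw [hsplit, List.append_assoc, List.append_assoc,
      List.set_append_right _ _ (by simp [List.length_take])]
    simp [List.length_take, List.replicate_succ,
      show min j P.length = j by omega, show P.length - (k + 1) = j by omega]

/-- cell-level mirror of A's inner loop over the remaining columns, on the
whole already-written prefix `P`. -/
def eastBR (m : Int) : List String → List String → Nat → Int → List String × Nat × Int
  | [], P, k, cou => (P, k, cou)
  | c :: q, P, k, cou =>
    let s : List String × Nat × Int :=
      if c = "#" ∧ 0 < k then (flushcat P k ++ ["#"], 0, cou + m * (k : Int))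
      else if c = "O" then (P ++ ["."], k + 1, cou)
      else (P ++ [c], k, cou)
    if q = [] ∧ 0 < s.2.1 then (flushcat s.1 s.2.1, 0, s.2.2 + m * ((s.2.1 : Nat) : Int))
    else eastBR m q s.1 s.2.1 s.2.2

theorem length_flushcat (L : List String) (k : Nat) (h : k ≤ L.length) :
    (flushcat L k).length = L.length := by
  simp [flushcat, List.length_take]; omega

theorem pyGetD_append_length {α : Type} (P t : List α) (c d : α) :
    PySem.List.pyGetD (P ++ c :: t) (P.length : Int) d = c := by
  rw [PySem.List.pyGetD_natCast]
  simp [List.getD_eq_getElem?_getD]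

theorem pySetD_append_length {α : Type} (P t : List α) (c v : α) :
    PySem.List.pySetD (P ++ c :: t) (P.length : Int) v = P ++ v :: t := by
  rw [PySem.List.pySetD_natCast, List.set_append_right _ _ (le_refl _)]
  simp

/-- one step of A's inner loop, evaluated at column `x = P.length` of the row
`P ++ c :: t` (`P` already processed, `c` the current cell). -/
theorem eastRowStep_eval (m : Int) (w : Nat) (P t : List String) (c : String)
    (k : Nat) (cou : Int) (hk : k ≤ P.length) :
    eastRowStep m w (P ++ c :: t, k, cou) ((P.length : Int))
      = if c = "#" ∧ 0 < k then (flushcat P k ++ c :: t, 0, cou + m * (k : Int))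
        else if c = "O" then
          (if P.length + 1 = w then
            (flushcat (P ++ ["."]) (k + 1) ++ t, 0, cou + m * ((k + 1 : Nat) : Int))
          else (P ++ "." :: t, k + 1, cou))
        else
          (if P.length + 1 = w ∧ 0 < k then
            (flushcat (P ++ [c]) k ++ t, 0, cou + m * (k : Int))
          else (P ++ c :: t, k, cou)) := by
  have hiff : ((P.length : Int) = (w : Int) - 1) ↔ P.length + 1 = w := by omega
  by_cases h1 : c = "#" ∧ 0 < k
  · have : eastRowStep m w (P ++ c :: t, k, cou) ((P.length : Int))
        = (eastWriteOs (P ++ c :: t) ((P.length : Int) - 1) k, 0, cou + m * (k : Int)) := by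
      simp only [eastRowStep, pyGetD_append_length]
      rw [if_pos h1]
      simp
    rw [this, if_pos h1, eastWriteOs_spec k P (c :: t) hk]
  · by_cases h2 : c = "O"
    · have hstep : eastRowStep m w (P ++ c :: t, k, cou) ((P.length : Int))
          = if (P.length : Int) = (w : Int) - 1 ∧ 0 < k + 1 then
              (eastWriteOs (P ++ "." :: t) ((P.length : Int)) (k + 1), 0,
                cou + m * ((k + 1 : Nat) : Int))
            else (P ++ "." :: t, k + 1, cou) := by
        simp only [eastRowStep, pyGetD_append_length]
        rw [if_neg h1, if_pos h2, pySetD_append_length]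
      rw [hstep, if_neg h1, if_pos h2]
      by_cases h3 : P.length + 1 = w
      · rw [if_pos ⟨hiff.mpr h3, Nat.succ_pos k⟩, if_pos h3]
        have : (P ++ "." :: t) = (P ++ ["."]) ++ t := by simp
        rw [this, show (P.length : Int) = (((P ++ ["."]).length : Nat) : Int) - 1 by simp,
          eastWriteOs_spec (k + 1) (P ++ ["."]) t (by simp; omega)]
      · rw [if_neg (by rw [hiff]; tauto), if_neg h3]
    · have hstep : eastRowStep m w (P ++ c :: t, k, cou) ((P.length : Int))
          = if (P.length : Int) = (w : Int) - 1 ∧ 0 < k then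
              (eastWriteOs (P ++ c :: t) ((P.length : Int)) k, 0, cou + m * (k : Int))
            else (P ++ c :: t, k, cou) := by
        simp only [eastRowStep, pyGetD_append_length]
        rw [if_neg h1, if_neg h2]
      rw [hstep, if_neg h1, if_neg h2]
      by_cases h3 : P.length + 1 = w ∧ 0 < k
      · rw [if_pos ⟨hiff.mpr h3.1, h3.2⟩, if_pos h3]
        have : (P ++ c :: t) = (P ++ [c]) ++ t := by simp
        rw [this, show (P.length : Int) = (((P ++ [c]).length : Nat) : Int) - 1 by simp,
          eastWriteOs_spec k (P ++ [c]) t (by simp; omega)]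
      · rw [if_neg (by rw [hiff]; tauto), if_neg h3]

theorem eastRowA_toBR (m : Int) (w : Nat) (rest : List String) :
    ∀ (q P : List String) (k : Nat) (cou : Int),
      P.length + q.length = w → k ≤ P.length →
      (PySem.List.pyRange (P.length : Int) (w : Int) 1).foldl (eastRowStep m w)
          (P ++ (q ++ rest), k, cou)
        = ((eastBR m q P k cou).1 ++ rest, (eastBR m q P k cou).2.1, (eastBR m q P k cou).2.2) := by
  intro q
  induction q with
  | nil =>
    intro P k cou hP hk
    rw [PySem.List.pyRange_one_eq_nil (by exact_mod_cast (by simp at hP; omega : w ≤ P.length))]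
    simp [eastBR]
  | cons c q' ih =>
    intro P k cou hP hk
    have hq : P.length + (q'.length + 1) = w := by simpa using hP
    rw [PySem.List.pyRange_one_cons (by exact_mod_cast (by omega : P.length < w)),
      List.foldl_cons]
    have hc : P ++ ((c :: q') ++ rest) = P ++ c :: (q' ++ rest) := by simp
    rw [hc, eastRowStep_eval m w P (q' ++ rest) c k cou hk]
    by_cases h1 : c = "#" ∧ 0 < k
    · rw [if_pos h1]
      have hl : (flushcat P k ++ [c]).length = P.length + 1 := by
        simp [length_flushcat P k hk]
      have hre : flushcat P k ++ c :: (q' ++ rest)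
          = (flushcat P k ++ [c]) ++ (q' ++ rest) := by simp
      have hcast : (P.length : Int) + 1 = (((flushcat P k ++ [c]).length : Nat) : Int) := by
        rw [hl]; push_cast; ring
      rw [hre, hcast, ih (flushcat P k ++ [c]) 0 (cou + m * (k : Int)) (by omega) (by omega)]
      have : eastBR m (c :: q') P k cou
          = eastBR m q' (flushcat P k ++ [c]) 0 (cou + m * (k : Int)) := by
        rw [eastBR]; simp [h1.1, h1.2]
      rw [this]
    · rw [if_neg h1]
      by_cases h2 : c = "O"
      · rw [if_pos h2]
        rcases q' with _ | ⟨c2, q2⟩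
        · rw [if_pos (by simpa using hq)]
          rw [PySem.List.pyRange_one_eq_nil
            (by exact_mod_cast (by simp at hq; omega : w ≤ P.length + 1))]
          simp only [List.foldl_nil]
          have : eastBR m [c] P k cou
              = (flushcat (P ++ ["."]) (k + 1), 0, cou + m * ((k + 1 : Nat) : Int)) := by
            rw [eastBR]; simp [h2]
          rw [this]
          simp
        · rw [if_neg (by simp at hq ⊢; omega)]
          have hre : P ++ "." :: (c2 :: q2 ++ rest) = (P ++ ["."]) ++ ((c2 :: q2) ++ rest) := by
            simp
          have hcast : (P.length : Int) + 1 = (((P ++ ["."]).length : Nat) : Int) := by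
            simp
          rw [hre, hcast,
            ih (P ++ ["."]) (k + 1) cou (by simp at hq ⊢; omega) (by simp; omega)]
          have : eastBR m (c :: c2 :: q2) P k cou
              = eastBR m (c2 :: q2) (P ++ ["."]) (k + 1) cou := by
            rw [eastBR]; simp [h2]
          rw [this]
      · rw [if_neg h2]
        rcases q' with _ | ⟨c2, q2⟩
        · by_cases h3 : 0 < k
          · rw [if_pos ⟨by simpa using hq, h3⟩]
            rw [PySem.List.pyRange_one_eq_nil
              (by exact_mod_cast (by simp at hq; omega : w ≤ P.length + 1))]
            simp only [List.foldl_nil]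
            have : eastBR m [c] P k cou
                = (flushcat (P ++ [c]) k, 0, cou + m * ((k : Nat) : Int)) := by
              rw [eastBR]
              have hns : ¬ c = "#" := fun h => h1 ⟨h, h3⟩
              simp [h2, h3, hns]
            rw [this]
            simp
          · rw [if_neg (by tauto)]
            rw [PySem.List.pyRange_one_eq_nil
              (by exact_mod_cast (by simp at hq; omega : w ≤ P.length + 1))]
            simp only [List.foldl_nil]
            have : eastBR m [c] P k cou = (P ++ [c], k, cou) := by
              rw [eastBR]
              simp [h2, h3, eastBR]
            rw [this]
            simp
        · rw [if_neg (by simp at hq ⊢; omega)]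
          have hre : P ++ c :: (c2 :: q2 ++ rest) = (P ++ [c]) ++ ((c2 :: q2) ++ rest) := by
            simp
          have hcast : (P.length : Int) + 1 = (((P ++ [c]).length : Nat) : Int) := by
            simp
          rw [hre, hcast, ih (P ++ [c]) k cou (by simp at hq ⊢; omega) (by simp; omega)]
          have : eastBR m (c :: c2 :: q2) P k cou = eastBR m (c2 :: q2) (P ++ [c]) k cou := by
            rw [eastBR]
            by_cases h3 : 0 < k
            · have hns : ¬ c = "#" := fun h => h1 ⟨h, h3⟩
              simp [h2, h3, hns]
            · simp [h2, h3]
          rw [this]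

theorem eastSegStep_shift (q : List String) :
    ∀ (R seg : List String) (t : Nat),
      q.foldl eastSegStep (R, seg, t)
        = ((q.foldl eastSegStep (R, seg, 0)).1, (q.foldl eastSegStep (R, seg, 0)).2.1,
           t + (q.foldl eastSegStep (R, seg, 0)).2.2) := by
  induction q with
  | nil => intro R seg t; simp
  | cons c q' ih =>
    intro R seg t
    simp only [List.foldl_cons, eastSegStep]
    by_cases h : c = "#"
    · simp only [if_pos h]
      rw [ih _ [] (t + (eastFlush seg).2), ih _ [] (0 + (eastFlush seg).2)]
      simp [Nat.add_assoc]
    · simp only [if_neg h]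
      exact ih R (seg ++ [c]) t

theorem flushcat_zero (L : List String) : flushcat L 0 = L := by simp [flushcat]

theorem count_le_dotted_len (seg : List String) :
    PySem.List.count seg "O" ≤ (seg.map (fun c => if c = "O" then "." else c)).length := by
  simp [PySem.List.count_eq, List.length_map]
  exact List.count_le_length

theorem eastFlush_eq (seg : List String) :
    eastFlush seg
      = (flushcat (seg.map (fun c => if c = "O" then "." else c)) (PySem.List.count seg "O"),
         PySem.List.count seg "O") := rfl

theorem eastBR_toB (m : Int) :
    ∀ (q R seg : List String) (cou : Int), q ≠ [] →
      eastBR m q (R ++ seg.map (fun c => if c = "O" then "." else c))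
          (PySem.List.count seg "O") cou
        = (let st := q.foldl eastSegStep (R, seg, 0)
           (st.1 ++ (eastFlush st.2.1).1, 0,
            cou + m * ((st.2.2 + (eastFlush st.2.1).2 : Nat) : Int))) := by
  intro q
  induction q with
  | nil => intro R seg cou h; exact absurd rfl h
  | cons c q' ih =>
    intro R seg cou _
    rcases q' with _ | ⟨c2, q2⟩
    · -- last cell of the row
      rw [eastBR]
      by_cases hc : c = "#"
      · subst hc
        by_cases hk : 0 < PySem.List.count seg "O"
        · rw [if_pos (show ("#" : String) = "#" ∧ 0 < PySem.List.count seg "O" from ⟨rfl, hk⟩),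
            if_neg (by simp)]
          simp only [eastBR, List.foldl_cons, List.foldl_nil, eastSegStep, eastFlush_eq]
          rw [flushcat_append R _ _ (count_le_dotted_len seg)]
          simp [flushcat_zero]
        · have hk0 : PySem.List.count seg "O" = 0 := by omega
          rw [if_neg (show ¬(("#" : String) = "#" ∧ 0 < PySem.List.count seg "O") by tauto),
            if_neg (show ¬("#" : String) = "O" by decide), if_neg (by simpa using hk)]
          simp only [eastBR, List.foldl_cons, List.foldl_nil, eastSegStep, eastFlush_eq]
          have hk0' : List.count "O" seg = 0 := by
            simpa [PySem.List.count_eq] using hk0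
          simp [hk0', flushcat_zero]
      · by_cases hO : c = "O"
        · subst hO
          rw [if_neg (show ¬(("O" : String) = "#" ∧ 0 < PySem.List.count seg "O") by
              intro h; exact absurd h.1 (by decide)),
            if_pos (show ("O" : String) = "O" from rfl),
            if_pos (show ([] : List String) = [] ∧ 0 < PySem.List.count seg "O" + 1 from
              ⟨rfl, Nat.succ_pos _⟩)]
          have hle : PySem.List.count seg "O" + 1
              ≤ ((seg.map (fun c => if c = "O" then "." else c)) ++ ["."]).length := by
            have := count_le_dotted_len seg
            simp [PySem.List.count_eq] at this ⊢
            omega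
          rw [List.append_assoc, flushcat_append R _ _ hle]
          simp only [List.foldl_cons, List.foldl_nil, eastSegStep,
            if_neg (by decide : ¬("O" : String) = "#"), eastFlush_eq]
          simp [PySem.List.count_eq, List.count_append, flushcat]
        · by_cases hk : 0 < PySem.List.count seg "O"
          · rw [if_neg (show ¬(c = "#" ∧ 0 < PySem.List.count seg "O") by tauto),
              if_neg hO,
              if_pos (show ([] : List String) = [] ∧ 0 < PySem.List.count seg "O" from
                ⟨rfl, hk⟩)]
            have hle : PySem.List.count seg "O"
                ≤ ((seg.map (fun c => if c = "O" then "." else c)) ++ [c]).length := by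
              have := count_le_dotted_len seg
              simp [PySem.List.count_eq] at this ⊢
              omega
            rw [List.append_assoc, flushcat_append R _ _ hle]
            simp only [List.foldl_cons, List.foldl_nil, eastSegStep, if_neg hc, eastFlush_eq]
            simp [PySem.List.count_eq, List.count_append, hO, flushcat]
          · rw [if_neg (show ¬(c = "#" ∧ 0 < PySem.List.count seg "O") by tauto),
              if_neg hO, if_neg (by simpa using hk)]
            simp only [eastBR, List.foldl_cons, List.foldl_nil, eastSegStep, if_neg hc,
              eastFlush_eq]
            simp [PySem.List.count_eq, List.count_append, hO, flushcat,
              show List.count "O" seg = 0 by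
                have h0 : PySem.List.count seg "O" = 0 := by omega
                simpa [PySem.List.count_eq] using h0]
    · -- more cells follow
      rw [eastBR]
      by_cases hc : c = "#"
      · subst hc
        by_cases hk : 0 < PySem.List.count seg "O"
        · rw [if_pos (show ("#" : String) = "#" ∧ 0 < PySem.List.count seg "O" from ⟨rfl, hk⟩),
            if_neg (by simp)]
          have happ : flushcat (R ++ seg.map (fun c => if c = "O" then "." else c))
                (PySem.List.count seg "O") ++ ["#"]
              = (R ++ (eastFlush seg).1 ++ ["#"])
                ++ ([] : List String).map (fun c => if c = "O" then "." else c) := by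
            rw [flushcat_append R _ _ (count_le_dotted_len seg)]
            simp [eastFlush_eq]
          have IH := ih (R ++ (eastFlush seg).1 ++ ["#"]) []
            (cou + m * ((PySem.List.count seg "O" : Nat) : Int)) (by simp)
          simp only [List.map_nil, List.append_nil,
            show PySem.List.count ([] : List String) "O" = 0 from rfl] at IH
          rw [happ]
          simp only [List.map_nil, List.append_nil]
          rw [IH]
          conv_rhs => rw [List.foldl_cons,
            show eastSegStep (R, seg, 0) "#"
                = (R ++ (eastFlush seg).1 ++ ["#"], [], (eastFlush seg).2) from by
              simp [eastSegStep],
            eastSegStep_shift (c2 :: q2) (R ++ (eastFlush seg).1 ++ ["#"]) []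
              ((eastFlush seg).2)]
          simp only [eastFlush_eq]
          push_cast
          ring_nf
        · have hk0 : PySem.List.count seg "O" = 0 := by omega
          rw [if_neg (show ¬(("#" : String) = "#" ∧ 0 < PySem.List.count seg "O") by tauto),
            if_neg (show ¬("#" : String) = "O" by decide), if_neg (by simp)]
          have happ : (R ++ seg.map (fun c => if c = "O" then "." else c)) ++ ["#"]
              = (R ++ (eastFlush seg).1 ++ ["#"])
                ++ ([] : List String).map (fun c => if c = "O" then "." else c) := by
            have hk0' : List.count "O" seg = 0 := by simpa [PySem.List.count_eq] using hk0
            simp [eastFlush_eq, PySem.List.count_eq, hk0', flushcat_zero]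
          have IH := ih (R ++ (eastFlush seg).1 ++ ["#"]) [] cou (by simp)
          simp only [List.map_nil, List.append_nil,
            show PySem.List.count ([] : List String) "O" = 0 from rfl] at IH
          rw [happ, show PySem.List.count seg "O" = 0 from hk0]
          simp only [List.map_nil, List.append_nil]
          rw [IH]
          conv_rhs => rw [List.foldl_cons,
            show eastSegStep (R, seg, 0) "#"
                = (R ++ (eastFlush seg).1 ++ ["#"], [], (eastFlush seg).2) from by
              simp [eastSegStep],
            eastSegStep_shift (c2 :: q2) (R ++ (eastFlush seg).1 ++ ["#"]) []
              ((eastFlush seg).2)]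
          simp only [eastFlush_eq]
          simp [show List.count "O" seg = 0 by simpa [PySem.List.count_eq] using hk0]
      · by_cases hO : c = "O"
        · subst hO
          rw [if_neg (show ¬(("O" : String) = "#" ∧ 0 < PySem.List.count seg "O") by
              intro h; exact absurd h.1 (by decide)),
            if_pos (show ("O" : String) = "O" from rfl), if_neg (by simp)]
          have h1 : (R ++ seg.map (fun c => if c = "O" then "." else c)) ++ ["."]
              = R ++ (seg ++ ["O"]).map (fun c => if c = "O" then "." else c) := by simp
          have h2 : PySem.List.count seg "O" + 1 = PySem.List.count (seg ++ ["O"]) "O" := by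
            simp [PySem.List.count_eq, List.count_append]
          rw [h1, h2, ih _ _ _ (by simp)]
          simp only [List.foldl_cons, eastSegStep, if_neg (by decide : ¬("O" : String) = "#")]
        · rw [if_neg (show ¬(c = "#" ∧ 0 < PySem.List.count seg "O") by tauto),
            if_neg hO, if_neg (by simp)]
          have h1 : (R ++ seg.map (fun c => if c = "O" then "." else c)) ++ [c]
              = R ++ (seg ++ [c]).map (fun c => if c = "O" then "." else c) := by simp [hO]
          have h2 : PySem.List.count seg "O" = PySem.List.count (seg ++ [c]) "O" := by
            simp [PySem.List.count_eq, List.count_append, hO]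
          rw [h1, h2, ih _ _ _ (by simp)]
          simp only [List.foldl_cons, eastSegStep, if_neg hc]

theorem eastRowA_eq_rowB (m : Int) (w : Nat) (p rest : List String) (cou : Int)
    (hp : p.length = w) :
    eastRowA m w (p ++ rest, 0, cou)
      = ((eastRowB p).1 ++ rest, 0, cou + m * ((eastRowB p).2 : Int)) := by
  unfold eastRowA
  have h := eastRowA_toBR m w rest p [] 0 cou (by simpa using hp) (by simp)
  simp only [List.length_nil, Nat.cast_zero, List.nil_append] at h
  rw [h]
  rcases p with _ | ⟨c, p'⟩
  · simp [eastBR, eastRowB, eastFlush]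
  · have hb := eastBR_toB m (c :: p') [] [] cou (by simp)
    simp only [List.map_nil, List.nil_append,
      show PySem.List.count ([] : List String) "O" = 0 from rfl] at hb
    rw [hb]
    simp [eastRowB]

theorem length_eastWriteOs (row : List String) (x0 : Int) :
    ∀ rc : Nat, (eastWriteOs row x0 rc).length = row.length := by
  intro rc
  induction rc with
  | zero => simp [eastWriteOs, PySem.List.pyRange_one_eq_nil]
  | succ k ih => rw [eastWriteOs_succ]; simp [PySem.List.length_pySetD, ih]

theorem length_eastRowStep (m : Int) (w : Nat) (st : List String × Nat × Int) (x : Int) :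
    (eastRowStep m w st x).1.length = st.1.length := by
  unfold eastRowStep
  dsimp only
  split_ifs <;> simp [length_eastWriteOs, PySem.List.length_pySetD]

theorem length_eastRowA_aux (m : Int) (w : Nat) :
    ∀ (l : List Int) (st : List String × Nat × Int),
      (l.foldl (eastRowStep m w) st).1.length = st.1.length := by
  intro l
  induction l with
  | nil => intro st; rfl
  | cons x l ih => intro st; rw [List.foldl_cons, ih]; exact length_eastRowStep m w st x

theorem length_eastRowB (p : List String) : (eastRowB p).1.length = p.length := by
  have h := eastRowA_eq_rowB 0 p.length p [] 0 rfl
  have h2 := length_eastRowA_aux 0 p.length (PySem.List.pyRange 0 (p.length : Int) 1)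
    (p ++ [], 0, 0)
  rw [show (PySem.List.pyRange 0 ((p.length : Nat) : Int) 1).foldl (eastRowStep 0 p.length)
      (p ++ [], 0, 0) = eastRowA 0 p.length (p ++ [], 0, 0) from rfl, h] at h2
  simpa using h2

theorem getD_zero_eq_headD {α : Type} (l : List α) (d : α) : l.getD 0 d = l.headD d := by
  cases l <;> simp

theorem east_outer (n w0 : Nat) :
    ∀ (todo acc : List (List String)) (cou : Int),
      acc.length + todo.length = n →
      (∀ r ∈ todo, w0 ≤ r.length) →
      (((acc ++ todo).headD []).length = w0 ∨ n = 0) →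
      (PySem.List.pyRange (acc.length : Int) (n : Int) 1).foldl (eastOuterStepA (n : Int))
          (acc ++ todo, 0, cou)
        = ((todo.foldl (eastOuterStepB (n : Int) w0) (acc, (acc.length : Int), cou)).1, 0,
           (todo.foldl (eastOuterStepB (n : Int) w0) (acc, (acc.length : Int), cou)).2.2) := by
  intro todo
  induction todo with
  | nil =>
    intro acc cou h1 _ _
    rw [PySem.List.pyRange_one_eq_nil (by exact_mod_cast (by simpa using h1.ge))]
    simp
  | cons r todo' ih =>
    intro acc cou h1 h2 h3
    have hn : acc.length < n := by simp at h1; omega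
    rw [PySem.List.pyRange_one_cons (by exact_mod_cast hn), List.foldl_cons]
    have hw0r : w0 ≤ r.length := h2 r (by simp)
    have hw : (PySem.List.pyGetD (acc ++ r :: todo') 0 ([] : List String)).length = w0 := by
      rcases h3 with h3 | h3
      · rw [PySem.List.pyGetD_zero, getD_zero_eq_headD]; exact h3
      · omega
    have hrowA : eastRowA ((n : Int) - (acc.length : Int)) w0 (r, 0, cou)
        = ((eastRowB (r.take w0)).1 ++ r.drop w0, 0,
           cou + ((n : Int) - (acc.length : Int)) * ((eastRowB (r.take w0)).2 : Int)) := by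
      have := eastRowA_eq_rowB ((n : Int) - (acc.length : Int)) w0 (r.take w0) (r.drop w0)
        cou (by simp [List.length_take]; omega)
      rwa [List.take_append_drop] at this
    have hstep : eastOuterStepA (n : Int) (acc ++ r :: todo', 0, cou) ((acc.length : Nat) : Int)
        = (acc ++ ((eastRowB (r.take w0)).1 ++ r.drop w0) :: todo', 0,
           cou + ((n : Int) - (acc.length : Int)) * ((eastRowB (r.take w0)).2 : Int)) := by
      simp only [eastOuterStepA, hw, pyGetD_append_length, hrowA, pySetD_append_length]
    rw [hstep]
    have hsplit : acc ++ ((eastRowB (r.take w0)).1 ++ r.drop w0) :: todo'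
        = (acc ++ [(eastRowB (r.take w0)).1 ++ r.drop w0]) ++ todo' := by simp
    have hcast : ((acc.length : Nat) : Int) + 1
        = (((acc ++ [(eastRowB (r.take w0)).1 ++ r.drop w0]).length : Nat) : Int) := by
      simp
    rw [hsplit, hcast,
      ih (acc ++ [(eastRowB (r.take w0)).1 ++ r.drop w0])
        (cou + ((n : Int) - (acc.length : Int)) * ((eastRowB (r.take w0)).2 : Int))
        (by simp at h1 ⊢; omega)
        (fun r' hr' => h2 r' (by simp [hr']))
        ?_]
    · -- B side: one fold step
      have hBstep : eastOuterStepB (n : Int) w0 (acc, ((acc.length : Nat) : Int), cou) r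
          = (acc ++ [(eastRowB (r.take w0)).1 ++ r.drop w0], ((acc.length : Nat) : Int) + 1,
             cou + ((n : Int) - (acc.length : Int)) * ((eastRowB (r.take w0)).2 : Int)) := by
        simp only [eastOuterStepB, PySem.List.slice_to_natCast, PySem.List.slice_from_natCast]
      rw [List.foldl_cons, hBstep, hcast]
    · -- head length is preserved
      rcases h3 with h3 | h3
      · left
        rcases acc with _ | ⟨a, acc'⟩
        · simp only [List.nil_append, List.headD_cons] at h3 ⊢
          simp [length_eastRowB, List.length_take, List.length_drop]
          omega
        · simpa using h3
      · right; exact h3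

-- ===== VERDICT (by name: the statement is the Claim_ definition above) =====
theorem east_spec : Claim_equal_east := by
  intro dish _ hpre
  unfold Spec_east
  rcases dish with _ | ⟨r0, rest⟩
  · decide
  · have h := east_outer (r0 :: rest).length ((r0 :: rest).headD []).length (r0 :: rest) [] 0
      (by simp) (fun r hr => hpre r hr) (Or.inl rfl)
    simp only [List.nil_append, List.length_nil, Nat.cast_zero] at h
    simp only [east, east_alt]
    rw [if_neg (by simp)]
    rw [h]
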